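-- pv_equiv track=rewrite | github.com/Abhishek-Mangalur/Python_Imp_Programs | bdho.py | octal_to_hex
-- ===== SOURCE A (Python) =====
-- def octal_to_hex(num_val):
--     rem = num_val % 16
--     ch = ""
--     if(rem < 10):
--         ch = rem
--     if(rem == 10):
--         ch = "A"
--     if(rem == 11):
--         ch = "B"
--     if(rem == 12):
--         ch = "C"
--     if(rem == 13):
--         ch = "D"
--     if(rem == 14):
--         ch = "E"
--     if(rem == 15):
--         ch = "F"
--     if(num_val - rem != 0):
--         return octal_to_hex(num_val // 16) + str(ch)
--     else:
--         return str(ch)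
-- ===== SOURCE B (Python) =====
-- def octal_to_hex(num_val):
--     DIGITS = "0123456789ABCDEF"
--     digits = []
--     while True:
--         digits.append(DIGITS[num_val % 16])
--         num_val //= 16
--         if num_val == 0:
--             break
--     return "".join(reversed(digits))
-- ===== Notes on version B (the rewrite author's own statement) =====
-- stated objective: idiomatic
-- what changed: Replaced the recursive if-chain digit selection with an iterative do-while loop using a single digit-lookup string, collecting digits least-significant-first and reversing at the end.
import Mathlib
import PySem

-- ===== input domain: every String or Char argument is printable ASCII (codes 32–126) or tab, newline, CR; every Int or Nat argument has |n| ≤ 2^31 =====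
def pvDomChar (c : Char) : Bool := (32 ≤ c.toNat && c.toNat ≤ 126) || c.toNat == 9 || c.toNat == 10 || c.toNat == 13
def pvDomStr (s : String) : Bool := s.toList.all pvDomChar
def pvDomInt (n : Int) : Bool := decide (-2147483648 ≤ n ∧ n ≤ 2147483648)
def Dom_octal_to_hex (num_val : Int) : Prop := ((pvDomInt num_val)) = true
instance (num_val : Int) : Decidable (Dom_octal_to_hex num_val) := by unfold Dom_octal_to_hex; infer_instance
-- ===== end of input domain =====

-- B replaces A's recursion with an if-chain per digit by an iterative loop over a digit-lookup
-- table (idiomatic, same cost); equivalence is about the return value on num_val ≥ 0.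

-- ===== PORT A =====
-- A-side helper: the if-chain that picks the character for one remainder (0 ≤ rem < 16),
-- already put through Python's final str(ch).
def octal_to_hex_ch (rem : Int) : String :=
  if rem < 10 then PySem.Int.toStr rem
  else if rem = 10 then "A"
  else if rem = 11 then "B"
  else if rem = 12 then "C"
  else if rem = 13 then "D"
  else if rem = 14 then "E"
  else if rem = 15 then "F"
  else ""

-- Fuel makes A's recursion total in Lean; num_val.natAbs + 1 always suffices for num_val ≥ 0
-- (Python's recursion does not terminate on negatives — those are outside Pre_).
def octal_to_hexGo : Nat → Int → String
  | 0, _ => ""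
  | fuel + 1, num_val =>
    let rem := PySem.Int.mod num_val 16
    let ch := octal_to_hex_ch rem
    if num_val - rem ≠ 0 then
      octal_to_hexGo fuel (PySem.Int.floordiv num_val 16) ++ ch
    else
      ch

def octal_to_hex (num_val : Int) : String :=
  octal_to_hexGo (num_val.natAbs + 1) num_val

-- ===== PORT B =====
def hexDIGITS : List Char := "0123456789ABCDEF".toList

-- The do-while loop of Source B: append DIGITS[num % 16], num //= 16, stop when num == 0.
def octal_to_hex_altGo : Nat → Int → List Char → List Char
  | 0, _, digits => digits
  | fuel + 1, num_val, digits =>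
    let digits := digits ++ [PySem.List.pyGetD hexDIGITS (PySem.Int.mod num_val 16) ' ']
    let num_val := PySem.Int.floordiv num_val 16
    if num_val = 0 then digits else octal_to_hex_altGo fuel num_val digits

def octal_to_hex_alt (num_val : Int) : String :=
  String.ofList (octal_to_hex_altGo (num_val.natAbs + 1) num_val []).reverse

-- ===== PRECONDITION & SPEC =====
-- Pre_ excludes negative inputs: there A recurses forever (Python RecursionError), returning nothing.
def Pre_octal_to_hex (num_val : Int) : Prop := 0 ≤ num_val
instance (num_val : Int) : Decidable (Pre_octal_to_hex num_val) := by unfold Pre_octal_to_hex; infer_instance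
def pvWitness_octal_to_hex : Int := (255)

def Spec_octal_to_hex (num_val : Int) (out : String) : Prop := out = octal_to_hex_alt num_val
instance (num_val : Int) (out : String) : Decidable (Spec_octal_to_hex num_val out) := by unfold Spec_octal_to_hex; infer_instance

-- ===== CLAIM (what is proved, stated in full; the proofs are below) =====
def Claim_equal_octal_to_hex : Prop := ∀ (num_val : Int), Dom_octal_to_hex num_val → Pre_octal_to_hex num_val → Spec_octal_to_hex num_val (octal_to_hex num_val)

-- ===== LEMMAS AND PROOFS =====

-- canonical least-significant-first hex digit list of a natural number
def hexLSB (n : Nat) : List Char :=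
  hexDIGITS.getD (n % 16) ' ' :: (if h : n / 16 = 0 then [] else hexLSB (n / 16))
termination_by n
decreasing_by exact Nat.div_lt_self (Nat.pos_of_ne_zero (fun h0 => h (by simp [h0]))) (by norm_num)

lemma ch_toList (r : Nat) (h : r < 16) :
    (octal_to_hex_ch (r : Int)).toList = [hexDIGITS.getD r ' '] := by
  interval_cases r <;> decide

lemma mod16_cast (n : Nat) : PySem.Int.mod (n : Int) 16 = ((n % 16 : Nat) : Int) := by
  exact_mod_cast PySem.Int.mod_natCast n 16

lemma div16_cast (n : Nat) : PySem.Int.floordiv (n : Int) 16 = ((n / 16 : Nat) : Int) := by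
  exact_mod_cast PySem.Int.floordiv_natCast n 16

lemma goA_eq : ∀ (fuel n : Nat), n < fuel →
    (octal_to_hexGo fuel (n : Int)).toList = (hexLSB n).reverse := by
  intro fuel
  induction fuel with
  | zero => intro n h; omega
  | succ f ih =>
    intro n hn
    rw [octal_to_hexGo, hexLSB]
    simp only [mod16_cast n, div16_cast n]
    by_cases hd : n / 16 = 0
    · have hz : ¬ ((n : Int) - ((n % 16 : Nat) : Int) ≠ 0) := by push_cast; omega
      rw [if_neg hz, dif_pos hd]
      simpa using ch_toList (n % 16) (by omega)
    · have hz : ((n : Int) - ((n % 16 : Nat) : Int) ≠ 0) := by push_cast; omega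
      rw [if_pos hz, dif_neg hd]
      have hlt : n / 16 < f := by omega
      simp only [String.toList_append, ih (n / 16) hlt, List.reverse_cons]
      rw [ch_toList (n % 16) (by omega)]

lemma goB_eq : ∀ (fuel n : Nat), n < fuel → ∀ (acc : List Char),
    octal_to_hex_altGo fuel (n : Int) acc = acc ++ hexLSB n := by
  intro fuel
  induction fuel with
  | zero => intro n h; omega
  | succ f ih =>
    intro n hn acc
    rw [octal_to_hex_altGo, hexLSB]
    simp only [mod16_cast n, div16_cast n]
    have hget : PySem.List.pyGetD hexDIGITS ((n % 16 : Nat) : Int) ' ' =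
        hexDIGITS.getD (n % 16) ' ' := PySem.List.pyGetD_natCast ..
    by_cases hd : n / 16 = 0
    · have h0 : ((n / 16 : Nat) : Int) = 0 := by exact_mod_cast hd
      rw [if_pos h0, dif_pos hd, hget]
    · have hz : ((n / 16 : Nat) : Int) ≠ 0 := by exact_mod_cast hd
      rw [if_neg hz, dif_neg hd, ih (n / 16) (by omega), hget]
      simp

-- ===== VERDICT (by name: the statement is the Claim_ definition above) =====
theorem octal_to_hex_spec : Claim_equal_octal_to_hex := by
  intro num_val _ hpre
  unfold Spec_octal_to_hex octal_to_hex octal_to_hex_alt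
  obtain ⟨n, rfl⟩ : ∃ n : Nat, num_val = (n : Int) := ⟨num_val.toNat, (Int.toNat_of_nonneg hpre).symm⟩
  have hfuel : n < (n : Int).natAbs + 1 := by simp
  rw [goB_eq _ n hfuel [], List.nil_append]
  have h1 := goA_eq _ n hfuel
  rw [← h1, String.ofList_toList]
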